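-- pv_equiv track=rewrite | github.com/Tiagosvi/Introduccion-a-la-programacion-I | parcialElecciones.py | acomodar
-- ===== SOURCE A (Python) =====
-- def acomodar (s: list[str]) -> list[str]:
--     res: list[str] = []
--
--
--     for i in range (len(s)):
--         if s[i] == "up":
--             res.append(s[i])
--
--     for i in range (len(s)):
--         if s[i] == "lla":
--             res.append(s[i])
--     return res
-- ===== SOURCE B (Python) =====
-- def acomodar(s: list[str]) -> list[str]:
--     # One pass: partition the matches into their two groups as we go,
--     # then concatenate the groups once at the end.
--     ups: list[str] = []
--     llas: list[str] = []
--     for h in s: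
--         if h == "up":
--             ups.append(h)
--         elif h == "lla":
--             llas.append(h)
--     return ups + llas
-- ===== Notes on version B (the rewrite author's own statement) =====
-- stated objective: simpler
-- what changed: B makes one pass that partitions the matches into an (ups, llas) pair of accumulators and concatenates once, instead of A's two separate index loops each rescanning the whole list.
import Mathlib
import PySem

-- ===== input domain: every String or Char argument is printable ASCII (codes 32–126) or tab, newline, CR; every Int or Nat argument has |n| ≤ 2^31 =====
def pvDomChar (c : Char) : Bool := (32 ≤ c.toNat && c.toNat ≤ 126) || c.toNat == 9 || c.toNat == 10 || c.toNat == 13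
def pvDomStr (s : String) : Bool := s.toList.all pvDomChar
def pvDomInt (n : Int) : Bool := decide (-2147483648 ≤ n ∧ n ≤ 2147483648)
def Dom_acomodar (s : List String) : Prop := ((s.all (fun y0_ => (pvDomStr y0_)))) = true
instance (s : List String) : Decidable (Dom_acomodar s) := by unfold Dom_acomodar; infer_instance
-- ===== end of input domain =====

-- B replaces A's two staged index loops by one pass that partitions matches into an
-- (ups, llas) pair of accumulators and concatenates once (objective: simpler).


-- ===== PORT A =====
def acomodar (s : List String) : List String :=
  let res : List String := []
  let res := (PySem.List.pyRange 0 (s.length : Int) 1).foldl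
    (fun res i => if PySem.List.pyGetD s i "" == "up" then res ++ [PySem.List.pyGetD s i ""] else res) res
  let res := (PySem.List.pyRange 0 (s.length : Int) 1).foldl
    (fun res i => if PySem.List.pyGetD s i "" == "lla" then res ++ [PySem.List.pyGetD s i ""] else res) res
  res

-- ===== PORT B =====
def acomodar_alt (s : List String) : List String :=
  let p := s.foldl
    (fun (p : List String × List String) h =>
      if h == "up" then (p.1 ++ [h], p.2)
      else if h == "lla" then (p.1, p.2 ++ [h])
      else p) ([], [])
  p.1 ++ p.2

-- ===== PRECONDITION & SPEC =====
def Spec_acomodar (s : List String) (out : List String) : Prop := out = acomodar_alt s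
instance (s : List String) (out : List String) : Decidable (Spec_acomodar s out) := by unfold Spec_acomodar; infer_instance

-- ===== CLAIM (what is proved, stated in full; the proofs are below) =====
def Claim_equal_acomodar : Prop := ∀ (s : List String), Dom_acomodar s → Spec_acomodar s (acomodar s)

-- ===== LEMMAS AND PROOFS =====
lemma acomodarGo_eq_filter (xs : List String) (acc : List String × List String) :
    xs.foldl
      (fun (p : List String × List String) h =>
        if h == "up" then (p.1 ++ [h], p.2)
        else if h == "lla" then (p.1, p.2 ++ [h])
        else p) acc
    = (acc.1 ++ xs.filter (· == "up"), acc.2 ++ xs.filter (· == "lla")) := by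
  induction xs generalizing acc with
  | nil => simp
  | cons h t ih =>
    simp only [List.foldl_cons, List.filter_cons, ih]
    split_ifs with h1 h2 <;> simp_all

lemma collect_eq_filter (s acc : List String) (v : String) :
    (PySem.List.pyRange 0 (s.length : Int) 1).foldl
      (fun res i => if PySem.List.pyGetD s i "" == v then res ++ [PySem.List.pyGetD s i ""] else res) acc
    = acc ++ s.filter (· == v) := by
  rw [PySem.List.foldl_pyRange_zero_pyGetD' s "" (fun res x => if x == v then res ++ [x] else res) acc]
  rw [PySem.List.foldl_append_if_eq_filter]

-- ===== VERDICT (by name: the statement is the Claim_ definition above) =====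
theorem acomodar_spec : Claim_equal_acomodar := by
  intro s _
  unfold Spec_acomodar acomodar acomodar_alt
  simp only [collect_eq_filter, acomodarGo_eq_filter, List.nil_append]
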